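-- pv_equiv track=rewrite | github.com/syncerpn/leetcode | 3784_min_deletion_cost_to_make_all_characters_equal.py | minCost
-- ===== SOURCE A (Python) =====
-- from typing import List
--
-- def minCost(s: str, cost: List[int]) -> int:
--     d = {}
--     m = 0
--     for i, c in enumerate(s):
--         if c not in d:
--             d[c] = 0
--         d[c] += cost[i]
--         m += cost[i]
--
--     return m - max(d.values())
-- ===== SOURCE B (Python) =====
-- from typing import List
--
-- def minCost(s: str, cost: List[int]) -> int:
--     total = sum(cost[:len(s)])
--     sums = [sum(w for ch, w in zip(s, cost) if ch == c) for c in dict.fromkeys(s)]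
--     return total - max(sums)
-- ===== Notes on version B (the rewrite author's own statement) =====
-- stated objective: alternative
-- what changed: Replaces A's single-pass dict accumulation (hash bucket per character, updated while enumerating) by a comprehension-based decomposition: total = sum(cost[:len(s)]), then one filtered scan of zip(s, cost) per distinct character (dict.fromkeys order) to build the group sums, returning total - max of them.
import Mathlib
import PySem

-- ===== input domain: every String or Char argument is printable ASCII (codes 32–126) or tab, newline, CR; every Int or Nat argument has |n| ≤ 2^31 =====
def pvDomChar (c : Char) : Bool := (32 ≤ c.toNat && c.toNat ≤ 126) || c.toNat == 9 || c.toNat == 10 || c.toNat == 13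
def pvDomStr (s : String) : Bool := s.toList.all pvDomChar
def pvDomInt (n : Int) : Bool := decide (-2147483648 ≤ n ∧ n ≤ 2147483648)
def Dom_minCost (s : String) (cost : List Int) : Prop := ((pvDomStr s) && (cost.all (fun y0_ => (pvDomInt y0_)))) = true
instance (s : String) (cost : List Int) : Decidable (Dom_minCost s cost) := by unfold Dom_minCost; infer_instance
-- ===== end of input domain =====

-- B replaces A's one-pass dict accumulation by per-distinct-character scans over zip(s, cost)
-- (objective: alternative decomposition, no speed claim). Return-value equivalence only.

-- ===== PORT A =====
-- Literal port of A: enumerate loop building a dict of per-char cost sums and the total m.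
def minCost (s : String) (cost : List Int) : Int :=
  let res := (PySem.List.enumerate s.toList 0).foldl
    (fun (acc : PySem.Dict Char Int × Int) ic =>
      let d0 := acc.1
      let d1 := if d0.contains ic.2 then d0 else d0.insert ic.2 0   -- if c not in d: d[c] = 0
      let w := PySem.List.pyGetD cost ic.1 0                        -- cost[i] (in range under Pre_)
      (d1.insert ic.2 (d1.getD ic.2 0 + w), acc.2 + w))             -- d[c] += cost[i]; m += cost[i]
    (PySem.Dict.empty, 0)
  res.2 - (PySem.List.max? res.1.values (fun v => v)).getD 0        -- max(d.values()); nonempty under Pre_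

-- ===== PORT B =====
-- Literal port of Source B: total = sum(cost[:len(s)]);
-- sums = [sum(w for ch, w in zip(s, cost) if ch == c) for c in dict.fromkeys(s)]
def minCost_alt (s : String) (cost : List Int) : Int :=
  let total := (PySem.List.slice cost none (some (s.toList.length : Int))).sum
  let sums := (PySem.List.dedup s.toList).map
    (fun c => (((s.toList.zip cost).filter (fun p => p.1 == c)).map Prod.snd).sum)
  total - (PySem.List.max? sums (fun v => v)).getD 0

-- ===== PRECONDITION & SPEC =====
-- A raises ValueError on empty s (max of an empty dict) and IndexError when cost is shorter
-- than s (cost[i] out of range); exactly those inputs are excluded.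
def Pre_minCost (s : String) (cost : List Int) : Prop :=
  s.toList ≠ [] ∧ s.toList.length ≤ cost.length
instance (s : String) (cost : List Int) : Decidable (Pre_minCost s cost) := by
  unfold Pre_minCost; infer_instance
def pvWitness_minCost : String × List Int := ("aba", [3, 5, 2])

def Spec_minCost (s : String) (cost : List Int) (out : Int) : Prop := out = minCost_alt s cost
instance (s : String) (cost : List Int) (out : Int) : Decidable (Spec_minCost s cost out) := by
  unfold Spec_minCost; infer_instance

-- ===== CLAIM (what is proved, stated in full; the proofs are below) =====
def Claim_equal_minCost : Prop := ∀ (s : String) (cost : List Int), Dom_minCost s cost → Pre_minCost s cost → Spec_minCost s cost (minCost s cost)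

-- ===== LEMMAS AND PROOFS =====

def gstep (acc : PySem.Dict Char Int × Int) (p : Char × Int) : PySem.Dict Char Int × Int :=
  (acc.1.insert p.1 (acc.1.getD p.1 0 + p.2), acc.2 + p.2)

-- A's fold over enumerate equals the zip fold with gstep
lemma foldA_eq (cost : List Int) (cs : List Char) : ∀ (k : Nat) (acc : PySem.Dict Char Int × Int),
    k + cs.length ≤ cost.length →
    (PySem.List.enumerate cs (k : Int)).foldl
      (fun acc ic =>
        let d0 := acc.1
        let d1 := if d0.contains ic.2 then d0 else d0.insert ic.2 0
        let w := PySem.List.pyGetD cost ic.1 0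
        (d1.insert ic.2 (d1.getD ic.2 0 + w), acc.2 + w)) acc
    = (cs.zip (cost.drop k)).foldl gstep acc := by
  induction cs with
  | nil => intro k acc h; simp [PySem.List.enumerate_nil]
  | cons c cs ih =>
    intro k acc h
    simp only [List.length_cons] at h
    have hk : k < cost.length := by omega
    rw [PySem.List.enumerate_cons, List.drop_eq_getElem_cons hk]
    simp only [List.zip_cons_cons, List.foldl_cons]
    have : ((k : Int) + 1) = ((k + 1 : Nat) : Int) := by push_cast; ring
    rw [this, ih (k+1) _ (by omega)]
    congr 1
    · simp only [gstep]
      have hw : PySem.List.pyGetD cost (k : Int) 0 = cost[k] := by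
        simp [PySem.List.pyGetD_natCast, hk]
      by_cases hc : acc.1.contains c
      · simp [hc, hw]
      · rw [if_neg hc, PySem.Dict.getD_insert_self, PySem.Dict.insert_insert_self,
            PySem.Dict.getD_of_not_contains _ _ (by simpa using hc), hw]

lemma gfold_snd (l : List (Char × Int)) : ∀ acc : PySem.Dict Char Int × Int,
    (l.foldl gstep acc).2 = acc.2 + (l.map Prod.snd).sum := by
  induction l with
  | nil => simp
  | cons p l ih => intro acc; simp only [List.foldl_cons, ih, gstep, List.map_cons, List.sum_cons]; ring

lemma gfold_fst (l : List (Char × Int)) : ∀ acc : PySem.Dict Char Int × Int,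
    (l.foldl gstep acc).1 = l.foldl (fun d p => d.insert p.1 (d.getD p.1 0 + p.2)) acc.1 := by
  induction l with
  | nil => simp
  | cons p l ih => intro acc; simp only [List.foldl_cons, ih, gstep]

lemma gfold_getD (l : List (Char × Int)) : ∀ (d : PySem.Dict Char Int) (c : Char),
    (l.foldl (fun d p => d.insert p.1 (d.getD p.1 0 + p.2)) d).getD c 0
      = d.getD c 0 + ((l.filter (fun p => p.1 == c)).map Prod.snd).sum := by
  induction l with
  | nil => simp
  | cons p l ih =>
    intro d c
    simp only [List.foldl_cons, ih, List.filter_cons]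
    by_cases h : p.1 = c
    · simp [h]; ring
    · rw [PySem.Dict.getD_insert]
      simp [Ne.symm h, h]


lemma map_snd_zip_take : ∀ (cs : List Char) (cost : List Int), cs.length ≤ cost.length →
    (cs.zip cost).map Prod.snd = cost.take cs.length := by
  intro cs
  induction cs with
  | nil => intro cost h; simp
  | cons c cs ih =>
    intro cost h
    cases cost with
    | nil => simp at h
    | cons x xs => simpa using ih xs (by simpa using h)

theorem minCost_eq_alt (s : String) (cost : List Int) (hlen : s.toList.length ≤ cost.length) :
    minCost s cost = minCost_alt s cost := by
  unfold minCost minCost_alt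
  set l := s.toList.zip cost with hl
  have hA : (PySem.List.enumerate s.toList 0).foldl
      (fun (acc : PySem.Dict Char Int × Int) ic =>
        let d0 := acc.1
        let d1 := if d0.contains ic.2 then d0 else d0.insert ic.2 0
        let w := PySem.List.pyGetD cost ic.1 0
        (d1.insert ic.2 (d1.getD ic.2 0 + w), acc.2 + w))
      (PySem.Dict.empty, 0)
      = l.foldl gstep (PySem.Dict.empty, 0) := by
    have h := foldA_eq cost s.toList 0 (PySem.Dict.empty, 0) (by simpa using hlen)
    simpa using h
  rw [hA]
  dsimp only
  -- sum component
  rw [gfold_snd, gfold_fst]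
  -- keys / values
  have hkeys : (l.foldl (fun d p => d.insert p.1 (d.getD p.1 0 + p.2)) (PySem.Dict.empty : PySem.Dict Char Int)).keys
      = PySem.List.dedup s.toList := by
    rw [PySem.Dict.keys_foldl_insert_key l Prod.fst (fun d p => d.getD p.1 0 + p.2) _,
        PySem.Dict.keys_empty, PySem.List.dedup_eq_ofList, PySem.Set.ofList_eq_foldl]
    rw [hl, List.map_fst_zip hlen]
    rfl
  have hnodup : (l.foldl (fun d p => d.insert p.1 (d.getD p.1 0 + p.2)) (PySem.Dict.empty : PySem.Dict Char Int)).keys.Nodup := by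
    exact PySem.Dict.nodup_keys_foldl_insert_key l Prod.fst _ _ (by simp [PySem.Dict.keys_empty])
  rw [PySem.Dict.values_eq_map_keys _ hnodup 0, hkeys]
  have hvals : ∀ c, (l.foldl (fun d p => d.insert p.1 (d.getD p.1 0 + p.2)) (PySem.Dict.empty : PySem.Dict Char Int)).getD c 0
      = ((l.filter (fun p => p.1 == c)).map Prod.snd).sum := by
    intro c; rw [gfold_getD, PySem.Dict.getD_empty]; ring
  simp only [hvals]
  rw [map_snd_zip_take s.toList cost hlen, PySem.List.slice_to_natCast, zero_add]

-- ===== VERDICT (by name: the statement is the Claim_ definition above) =====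
theorem minCost_spec : Claim_equal_minCost := by
  intro s cost _ hpre
  exact minCost_eq_alt s cost hpre.2
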